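-- pv_equiv track=rewrite | github.com/noammirjani/Cryptography | Vigenere Cipher/main.py | get_key_size
-- ===== SOURCE A (Python) =====
-- def get_key_size(message: str, max_key_size: int) -> int:
--     curr_match = 0
--     size = 0
--     max_match = 0
--
--     if max_key_size is not None:
--         max_size = max_key_size
--     else:
--         max_size = len(message)
--
--     for i in range(1, max_size + 1):
--         for j in range(len(message) - i):
--             if message[j] == message[j + i]:
--                 curr_match += 1
--         if curr_match > max_match:
--             max_match = curr_match
--             size = i
--         curr_match = 0
--
--     return size
-- ===== SOURCE B (Python) =====
-- def get_key_size(message: str, max_key_size: int) -> int: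
--     n = len(message)
--     max_size = n if max_key_size is None else max_key_size
--
--     # Bucket the positions of each distinct character, then count, per distance d,
--     # the same-character position pairs (p, p+d) -- no per-shift rescans of the text.
--     positions = {}
--     for idx, ch in enumerate(message):
--         positions.setdefault(ch, []).append(idx)
--
--     counts = {}
--     for pos in positions.values():
--         m = len(pos)
--         for a in range(m):
--             for b in range(a + 1, m):
--                 d = pos[b] - pos[a]
--                 counts[d] = counts.get(d, 0) + 1
--
--     # Pick the smallest eligible distance with the maximal pair count.
--     best = 0
--     size = 0
--     for d, c in counts.items():
--         if d <= max_size and (c > best or (c == best and d < size)):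
--             best = c
--             size = d
--     return size
-- ===== Notes on version B (the rewrite author's own statement) =====
-- stated objective: faster
-- what changed: Instead of rescanning the whole text for every candidate shift, B buckets the positions of each distinct character once, builds a histogram counting, per distance d, the same-character position pairs (p, p+d), and then picks the smallest distance <= max_size with the maximal pair count from that histogram.
import Mathlib
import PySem

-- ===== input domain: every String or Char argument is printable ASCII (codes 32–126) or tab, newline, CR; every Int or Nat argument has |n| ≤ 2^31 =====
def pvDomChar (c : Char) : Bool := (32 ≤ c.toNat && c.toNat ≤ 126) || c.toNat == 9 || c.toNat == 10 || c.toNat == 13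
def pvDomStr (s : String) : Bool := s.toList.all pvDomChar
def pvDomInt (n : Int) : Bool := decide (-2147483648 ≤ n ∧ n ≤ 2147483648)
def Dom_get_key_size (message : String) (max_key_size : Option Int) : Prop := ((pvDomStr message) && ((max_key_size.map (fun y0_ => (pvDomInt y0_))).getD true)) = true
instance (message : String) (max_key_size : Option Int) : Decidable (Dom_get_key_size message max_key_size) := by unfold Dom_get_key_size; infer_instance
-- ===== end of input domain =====

-- B buckets the positions of each distinct character once, builds a histogram of
-- same-character position-pair distances, and picks the smallest eligible distance
-- with the maximal pair count — instead of A's rescan of the text per shift; objective: faster.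

-- ===== PORT A =====
def get_key_size (message : String) (max_key_size : Option Int) : Int :=
  let s := message.toList
  let max_size : Int :=
    match max_key_size with
    | some m => m
    | none => (s.length : Int)
  let res :=
    (PySem.List.pyRange 1 (max_size + 1) 1).foldl
      (fun (st : Int × Int) i =>
        -- inner loop: for j in range(len(message) - i): if message[j] == message[j+i]
        let curr_match : Int :=
          (PySem.List.pyRange 0 ((s.length : Int) - i) 1).foldl
            (fun acc j =>
              if PySem.List.pyGet? s j = PySem.List.pyGet? s (j + i) then acc + 1 else acc)
            0
        if curr_match > st.2 then (i, curr_match) else st)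
      (0, 0)
  res.1

-- ===== PORT B =====
def get_key_size_alt (message : String) (max_key_size : Option Int) : Int :=
  let s := message.toList
  let n : Int := (s.length : Int)
  let max_size : Int :=
    match max_key_size with
    | some m => m
    | none => n
  -- positions.setdefault(ch, []).append(idx)
  let positions : PySem.Dict Char (List Int) :=
    (PySem.List.enumerate s).foldl
      (fun d p => d.modify p.2 [] (fun l => l ++ [p.1])) PySem.Dict.empty
  -- counts[d] = counts.get(d, 0) + 1 over same-bucket index pairs a < b
  let counts : PySem.Dict Int Int :=
    positions.values.foldl
      (fun cd pos =>
        let m : Int := (pos.length : Int)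
        (PySem.List.pyRange 0 m 1).foldl
          (fun cd a =>
            (PySem.List.pyRange (a + 1) m 1).foldl
              (fun cd b =>
                let d := PySem.List.pyGetD pos b 0 - PySem.List.pyGetD pos a 0
                cd.insert d (cd.getD d 0 + 1)) cd) cd)
      PySem.Dict.empty
  -- smallest eligible distance with the maximal pair count
  let res :=
    counts.items.foldl
      (fun (st : Int × Int) dc =>
        if dc.1 ≤ max_size ∧ (dc.2 > st.1 ∨ (dc.2 = st.1 ∧ dc.1 < st.2)) then (dc.2, dc.1) else st)
      (0, 0)
  res.2

-- ===== PRECONDITION & SPEC =====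
def Spec_get_key_size (message : String) (max_key_size : Option Int) (out : Int) : Prop := out = get_key_size_alt message max_key_size
instance (message : String) (max_key_size : Option Int) (out : Int) : Decidable (Spec_get_key_size message max_key_size out) := by unfold Spec_get_key_size; infer_instance

-- ===== CLAIM (what is proved, stated in full; the proofs are below) =====
def Claim_equal_get_key_size : Prop := ∀ (message : String) (max_key_size : Option Int), Dom_get_key_size message max_key_size → Spec_get_key_size message max_key_size (get_key_size message max_key_size)

-- ===== LEMMAS AND PROOFS =====

/-- The match count at shift `i`, as a zip count. -/
def pvCnt (s : List Char) (i : Int) : Int :=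
  ((s.zip (s.drop i.toNat)).countP (fun p => p.1 == p.2) : Int)

/-- All pairwise differences `pos[b] - pos[a]`, `a < b`, structurally. -/
def pvPairs : List Int → List Int
  | [] => []
  | x :: t => t.map (· - x) ++ pvPairs t

/-- Positions (as Int) of character `c` in `s`. -/
def pvPos (s : List Char) (c : Char) : List Int :=
  ((PySem.List.enumerate s).filter (fun p => p.2 == c)).map (·.1)

/-- All same-character pair distances of `s`. -/
def pvDists (s : List Char) : List Int :=
  (PySem.Set.ofList s).flatMap (fun c => pvPairs (pvPos s c))

/-- zip-count as a count over indices. -/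
lemma pvCountP_zip (u v : List Char) :
    (u.zip v).countP (fun p => p.1 == p.2)
      = (List.range (min u.length v.length)).countP (fun k => u[k]? == v[k]?) := by
  induction u generalizing v with
  | nil => simp
  | cons a u ih =>
    cases v with
    | nil => simp
    | cons b v =>
      have hmin : min (a :: u).length (b :: v).length = (min u.length v.length) + 1 := by
        simp [List.length_cons]
      rw [hmin, List.range_succ_eq_map]
      simp only [List.zip_cons_cons, List.countP_cons, List.countP_map, ih v,
        Function.comp_def, Nat.succ_eq_add_one]
      simp [add_comm]

/-- A's inner loop computes the zip count. -/
lemma pvInner_eq (s : List Char) (i : Int) (hi : 0 ≤ i) :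
    (PySem.List.pyRange 0 ((s.length : Int) - i) 1).foldl
      (fun acc j =>
        if PySem.List.pyGet? s j = PySem.List.pyGet? s (j + i) then acc + 1 else acc) 0
    = pvCnt s i := by
  obtain ⟨t, rfl⟩ : ∃ t : Nat, i = (t : Int) := ⟨i.toNat, (Int.toNat_of_nonneg hi).symm⟩
  rw [PySem.List.foldl_ite_add_one, PySem.List.pyRange_one, List.countP_map]
  rw [pvCnt, pvCountP_zip]
  have hm : ((s.length : Int) - (t : Int) - 0).toNat
      = min s.length (s.drop (t : Int).toNat).length := by
    simp
  rw [hm]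
  norm_num
  apply List.countP_congr
  intro k _
  simp only [Function.comp_apply]
  have h2 : (k : Int) + (t : Int) = (((k + t : Nat)) : Int) := by push_cast; ring
  rw [h2, PySem.List.pyGet?_natCast, PySem.List.pyGet?_natCast]
  simp [Nat.add_comm]

/-- Characterisation of A's strict-improvement argmax fold. -/
lemma pvFoldA_char (f : Int → Int) (l : List Int) : ∀ (sz m : Int),
    l.foldl (fun st i => if f i > st.2 then (i, f i) else st) (sz, m)
      = (if (l.map f).foldl max m > m
          then (l.find? (fun i => decide ((l.map f).foldl max m ≤ f i))).getD 0
          else sz,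
        (l.map f).foldl max m) := by
  induction l with
  | nil => intro sz m; simp
  | cons i t ih =>
    intro sz m
    simp only [List.foldl_cons, List.map_cons]
    by_cases hfi : f i > m
    · rw [if_pos hfi]
      have hmax : max m (f i) = f i := by omega
      simp only [hmax]
      rw [ih i (f i)]
      have hfiM : f i ≤ (t.map f).foldl max (f i) := (PySem.List.le_foldl_max _ _).1
      have hMm : (t.map f).foldl max (f i) > m := by omega
      rw [if_pos hMm]
      by_cases hMi : (t.map f).foldl max (f i) ≤ f i
      · have heq : (t.map f).foldl max (f i) = f i := le_antisymm hMi hfiM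
        rw [if_neg (by omega)]
        rw [List.find?_cons_of_pos (p := fun i => decide _) (by simp [heq])]
        simp [heq]
      · rw [if_pos (by omega)]
        rw [List.find?_cons_of_neg (p := fun i => decide _) (by simp; omega)]
    · rw [if_neg hfi]
      have hmax : max m (f i) = m := by omega
      simp only [hmax]
      rw [ih sz m]
      by_cases hMm : (t.map f).foldl max m > m
      · rw [if_pos hMm, if_pos hMm]
        rw [List.find?_cons_of_neg (p := fun i => decide _) (by simp; omega)]
      · rw [if_neg hMm, if_neg hMm]

/-- A fold of `max` over a list either keeps the seed or lands on a member. -/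
lemma pvFoldMax_attained (l : List Int) : ∀ (a : Int), l.foldl max a = a ∨ l.foldl max a ∈ l := by
  induction l with
  | nil => intro a; left; rfl
  | cons x t ih =>
    intro a
    simp only [List.foldl_cons]
    rcases ih (max a x) with h | h
    · rcases max_choice a x with h2 | h2
      · left; rw [h, h2]
      · right; rw [h, h2]; exact .head t
    · right; exact .tail x h

/-- find? on a strictly sorted list: the unique "first" witness. -/
lemma pvFind_sorted (l : List Int) (p : Int → Bool) (z : Int)
    (hs : l.Pairwise (· < ·)) (hz : z ∈ l) (hpz : p z = true)
    (hlt : ∀ y ∈ l, y < z → p y = false) : l.find? p = some z := by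
  induction l with
  | nil => cases hz
  | cons x t ih =>
    by_cases hx : x = z
    · subst hx; rw [List.find?_cons_of_pos hpz]
    · have hzt : z ∈ t := by cases hz with | head => exact absurd rfl hx | tail _ h => exact h
      have hxz : x < z := (List.pairwise_cons.mp hs).1 z hzt
      rw [List.find?_cons_of_neg (by simp [hlt x (.head t) hxz])]
      exact ih (List.pairwise_cons.mp hs).2 hzt (fun y hy => hlt y (.tail x hy))

/-- Characterisation of B's best/size selection fold over (distance, count) pairs. -/
lemma pvFoldB_char (ms : Int) (f : Int → Int) (L : List Int) (hL : ∀ d ∈ L, 1 ≤ d ∧ 1 ≤ f d)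
    (r : Int × Int)
    (hr : r = (L.map (fun d => (d, f d))).foldl
        (fun (st : Int × Int) dc =>
          if dc.1 ≤ ms ∧ (dc.2 > st.1 ∨ (dc.2 = st.1 ∧ dc.1 < st.2)) then (dc.2, dc.1) else st)
        (0, 0)) :
    (r = (0, 0) ∧ ∀ d ∈ L, ¬ (d ≤ ms)) ∨
    (r.2 ∈ L ∧ r.2 ≤ ms ∧ f r.2 = r.1 ∧
      ∀ d ∈ L, d ≤ ms → f d < r.1 ∨ (f d = r.1 ∧ r.2 ≤ d)) := by
  induction L using List.reverseRecOn generalizing r with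
  | nil => left; exact ⟨hr, by simp⟩
  | append_singleton L' e ih =>
    have hL' : ∀ x ∈ L', 1 ≤ x ∧ 1 ≤ f x := fun x hx => hL x (List.mem_append_left _ hx)
    have he := hL e (List.mem_append_right _ (List.mem_singleton_self e))
    rw [List.map_append, List.foldl_append] at hr
    simp only [List.map_cons, List.map_nil, List.foldl_cons, List.foldl_nil] at hr
    rcases ih hL' _ rfl with ⟨hr0, hnone⟩ | ⟨hmem, hms, hfr, hall⟩
    · rw [hr0] at hr
      by_cases hem : e ≤ ms
      · have hcond : e ≤ ms ∧ (f e > (0:Int) ∨ (f e = (0:Int) ∧ e < (0:Int))) :=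
          ⟨hem, Or.inl (by omega)⟩
        rw [if_pos hcond] at hr
        right
        refine ⟨by rw [hr]; exact List.mem_append_right _ (List.mem_singleton_self e),
          by rw [hr]; exact hem, by rw [hr], ?_⟩
        intro x hx hxms
        rcases List.mem_append.mp hx with hx' | hx'
        · exact absurd hxms (hnone x hx')
        · rw [List.mem_singleton.mp hx', hr]; exact Or.inr ⟨rfl, le_refl _⟩
      · rw [if_neg (by intro hc; exact hem hc.1)] at hr
        left
        refine ⟨hr, ?_⟩
        intro x hx
        rcases List.mem_append.mp hx with hx' | hx'
        · exact hnone x hx'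
        · rw [List.mem_singleton.mp hx']; exact hem
    · set r' := (L'.map (fun d => (d, f d))).foldl
        (fun (st : Int × Int) dc =>
          if dc.1 ≤ ms ∧ (dc.2 > st.1 ∨ (dc.2 = st.1 ∧ dc.1 < st.2)) then (dc.2, dc.1) else st)
        (0, 0) with hr'
      by_cases hc : e ≤ ms ∧ (f e > r'.1 ∨ (f e = r'.1 ∧ e < r'.2))
      · rw [if_pos hc] at hr
        right
        refine ⟨by rw [hr]; exact List.mem_append_right _ (List.mem_singleton_self e),
          by rw [hr]; exact hc.1, by rw [hr], ?_⟩
        intro x hx hxms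
        rcases List.mem_append.mp hx with hx' | hx'
        · rcases hall x hx' hxms with h1 | ⟨h1, h2⟩
          · rcases hc.2 with h3 | ⟨h3, h4⟩
            · left; rw [hr]; simp only; omega
            · left; rw [hr]; simp only; omega
          · rcases hc.2 with h3 | ⟨h3, h4⟩
            · left; rw [hr]; simp only; omega
            · right; rw [hr]; exact ⟨by simp only; omega, by simp only; omega⟩
        · rw [List.mem_singleton.mp hx', hr]; exact Or.inr ⟨rfl, le_refl _⟩
      · rw [if_neg hc] at hr
        right
        refine ⟨by rw [hr]; exact List.mem_append_left _ hmem, by rw [hr]; exact hms,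
          by rw [hr]; exact hfr, ?_⟩
        intro x hx hxms
        rcases List.mem_append.mp hx with hx' | hx'
        · rw [hr]; exact hall x hx' hxms
        · obtain rfl := List.mem_singleton.mp hx'
          push_neg at hc
          have h1 := hc hxms
          rw [hr]
          by_cases h2 : f x = r'.1
          · exact Or.inr ⟨h2, h1.2 h2⟩
          · exact Or.inl (by have := h1.1; omega)

/-- The port's bucket dict, as a fold over swapped (char, index) pairs. -/
lemma pvPositions_swap (s : List Char) :
    (PySem.List.enumerate s).foldl
      (fun d p => d.modify p.2 [] (fun l => l ++ [p.1])) PySem.Dict.empty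
    = ((PySem.List.enumerate s).map (fun q => (q.2, q.1))).foldl
        (fun d p => d.modify p.1 [] (fun l => l ++ [p.2])) PySem.Dict.empty := by
  rw [List.foldl_map]

/-- Lookups in the port's bucket dict are `pvPos`. -/
lemma pvPositions_getD (s : List Char) (c : Char) :
    ((PySem.List.enumerate s).foldl
      (fun d p => d.modify p.2 [] (fun l => l ++ [p.1])) PySem.Dict.empty).getD c []
    = pvPos s c := by
  rw [pvPositions_swap, PySem.Dict.getD_foldl_modify_append, List.filter_map]
  simp only [PySem.Dict.getD_empty, List.nil_append, List.map_map]
  rfl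

/-- Keys of the port's bucket dict: the distinct characters in first-occurrence order. -/
lemma pvPositions_keys (s : List Char) :
    ((PySem.List.enumerate s).foldl
      (fun d p => d.modify p.2 [] (fun l => l ++ [p.1])) PySem.Dict.empty).keys
    = PySem.Set.ofList s := by
  rw [pvPositions_swap, PySem.Dict.keys_foldl_modify_key, List.map_map]
  have h2 : ((PySem.List.enumerate s).map ((fun (q : Char × Int) => q.1) ∘ (fun q => (q.2, q.1))))
      = (PySem.List.enumerate s).map (fun q => q.2) := rfl
  rw [h2, PySem.List.map_snd_enumerate]
  rfl

/-- Values of the port's bucket dict. -/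
lemma pvPositions_values (s : List Char) :
    ((PySem.List.enumerate s).foldl
      (fun d p => d.modify p.2 [] (fun l => l ++ [p.1])) PySem.Dict.empty).values
    = (PySem.Set.ofList s).map (fun c => pvPos s c) := by
  rw [PySem.Dict.values_eq_map_keys _ (by rw [pvPositions_keys]; exact PySem.Set.nodup_ofList s) []]
  rw [pvPositions_keys]
  exact List.map_congr_left (fun c _ => pvPositions_getD s c)

/-- Shifting index loops from `x :: t` down to `t`. -/
lemma pvGetShift (x : Int) (t : List Int) (a : Int) (ha : 0 ≤ a) :
    (PySem.List.pyRange (a + 1) ((t.length : Int) + 1) 1).map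
      (fun b => PySem.List.pyGetD (x :: t) b 0)
    = (PySem.List.pyRange a ((t.length : Int)) 1).map (fun b => PySem.List.pyGetD t b 0) := by
  obtain ⟨m, rfl⟩ : ∃ m : Nat, a = (m : Int) := ⟨a.toNat, (Int.toNat_of_nonneg ha).symm⟩
  rw [PySem.List.pyRange_one, PySem.List.pyRange_one]
  have hlen : ((t.length : Int) + 1 - ((m : Int) + 1)).toNat = ((t.length : Int) - (m : Int)).toNat := by
    omega
  rw [hlen, List.map_map, List.map_map]
  apply List.map_congr_left
  intro k _
  simp only [Function.comp_apply]
  have h1 : ((m : Int) + 1 + (k : Int)) = (((m + k + 1 : Nat)) : Int) := by push_cast; ring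
  have h2 : ((m : Int) + (k : Int)) = (((m + k : Nat)) : Int) := by push_cast; ring
  rw [h1, h2, PySem.List.pyGetD_natCast, PySem.List.pyGetD_natCast]
  simp

/-- One step of the double loop, shifted from `x :: t` down to `t`. -/
lemma pvGStep (x : Int) (t : List Int) (k : Nat) :
    (PySem.List.pyRange ((0 + 1 + (k : Int)) + 1) ((t.length : Int) + 1) 1).map
      (fun b => PySem.List.pyGetD (x :: t) b 0 - PySem.List.pyGetD (x :: t) (0 + 1 + (k : Int)) 0)
    = (PySem.List.pyRange ((0 + (k : Int)) + 1) ((t.length : Int)) 1).map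
      (fun b => PySem.List.pyGetD t b 0 - PySem.List.pyGetD t (0 + (k : Int)) 0) := by
  have e1 : (0 + 1 + (k : Int)) = (((k + 1 : Nat)) : Int) := by push_cast; ring
  have e2 : (0 + (k : Int)) = ((k : Nat) : Int) := by omega
  rw [e1, e2, PySem.List.pyGetD_natCast, PySem.List.pyGetD_natCast]
  have e3 : (x :: t).getD (k + 1) 0 = t.getD k 0 := by simp
  rw [e3]
  have hcomp : ∀ (G : Int → Int) (c : Int), (fun b => G b - c) = (fun v => v - c) ∘ G :=
    fun _ _ => rfl
  rw [hcomp (fun b => PySem.List.pyGetD (x :: t) b 0) (t.getD k 0),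
    hcomp (fun b => PySem.List.pyGetD t b 0) (t.getD k 0),
    ← List.map_map, ← List.map_map]
  rw [show (((k + 1 : Nat)) : Int) + 1 = ((k : Int) + 1) + 1 by push_cast; ring]
  rw [pvGetShift x t ((k : Int) + 1) (by positivity)]

/-- The index-pair double range computes `pvPairs`. -/
lemma pvDistsIdx_eq (pos : List Int) :
    (PySem.List.pyRange 0 ((pos.length : Int)) 1).flatMap
      (fun a => (PySem.List.pyRange (a + 1) ((pos.length : Int)) 1).map
        (fun b => PySem.List.pyGetD pos b 0 - PySem.List.pyGetD pos a 0))
    = pvPairs pos := by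
  induction pos with
  | nil => simp [pvPairs, PySem.List.pyRange_one_eq_nil]
  | cons x t ih =>
    have hlen : (((x :: t).length : Int)) = (t.length : Int) + 1 := by
      simp [List.length_cons]
    rw [hlen, PySem.List.pyRange_one_cons (by positivity), List.flatMap_cons]
    have hhead : (PySem.List.pyRange (0 + 1) ((t.length : Int) + 1) 1).map
        (fun b => PySem.List.pyGetD (x :: t) b 0 - PySem.List.pyGetD (x :: t) 0 0)
        = t.map (· - x) := by
      rw [PySem.List.pyGetD_zero_cons]
      have hcomp : (fun b => PySem.List.pyGetD (x :: t) b 0 - x)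
          = (fun v => v - x) ∘ (fun b => PySem.List.pyGetD (x :: t) b 0) := rfl
      rw [hcomp, ← List.map_map, pvGetShift x t 0 le_rfl]
      rw [PySem.List.map_pyGetD_pyRange_zero']
    have htail : (PySem.List.pyRange (0 + 1) ((t.length : Int) + 1) 1).flatMap
        (fun a => (PySem.List.pyRange (a + 1) ((t.length : Int) + 1) 1).map
          (fun b => PySem.List.pyGetD (x :: t) b 0 - PySem.List.pyGetD (x :: t) a 0))
        = (PySem.List.pyRange 0 ((t.length : Int)) 1).flatMap
          (fun a => (PySem.List.pyRange (a + 1) ((t.length : Int)) 1).map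
            (fun b => PySem.List.pyGetD t b 0 - PySem.List.pyGetD t a 0)) := by
      rw [PySem.List.pyRange_one (0 + 1) ((t.length : Int) + 1),
        PySem.List.pyRange_one 0 ((t.length : Int))]
      have hl2 : ((t.length : Int) + 1 - (0 + 1)).toNat = ((t.length : Int) - 0).toNat := by omega
      rw [hl2, List.flatMap_map, List.flatMap_map]
      exact congrArg (fun F => List.flatMap F (List.range (((t.length : Int)) - 0).toNat))
        (funext fun k => pvGStep x t k)
    rw [hhead, htail, ih]
    rfl

/-- The port's double index loop is the insert-counter fold over `pvPairs`. -/
lemma pvInnerB (pos : List Int) (cd : PySem.Dict Int Int) :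
    (PySem.List.pyRange 0 ((pos.length : Int)) 1).foldl
      (fun cd a =>
        (PySem.List.pyRange (a + 1) ((pos.length : Int)) 1).foldl
          (fun cd b =>
            cd.insert (PySem.List.pyGetD pos b 0 - PySem.List.pyGetD pos a 0)
              (cd.getD (PySem.List.pyGetD pos b 0 - PySem.List.pyGetD pos a 0) 0 + 1)) cd) cd
    = (pvPairs pos).foldl (fun cd x => cd.insert x (cd.getD x 0 + 1)) cd := by
  rw [← pvDistsIdx_eq pos, List.foldl_flatMap]
  apply PySem.List.foldl_congr_mem
  intro acc a _
  rw [List.foldl_map]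

/-- Elements of `pvPairs` of a strictly increasing list are ≥ 1. -/
lemma pvPairs_pos (pos : List Int) (hs : pos.Pairwise (· < ·)) :
    ∀ x ∈ pvPairs pos, 1 ≤ x := by
  induction pos with
  | nil => intro x hx; cases hx
  | cons a t ih =>
    intro x hx
    rcases List.mem_append.mp hx with h | h
    · obtain ⟨y, hy, rfl⟩ := List.mem_map.mp h
      have := (List.pairwise_cons.mp hs).1 y hy
      omega
    · exact ih (List.pairwise_cons.mp hs).2 x h

/-- Pair-distance count in a strictly increasing list. -/
lemma pvPairs_count (pos : List Int) (d : Int) (hd : 1 ≤ d) :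
    pos.Pairwise (· < ·) →
    (pvPairs pos).count d = pos.countP (fun p => decide ((p + d) ∈ pos)) := by
  induction pos with
  | nil => intro _; simp [pvPairs]
  | cons x t ih =>
    intro hs
    have hlt : ∀ y ∈ t, x < y := (List.pairwise_cons.mp hs).1
    have hst : t.Pairwise (· < ·) := (List.pairwise_cons.mp hs).2
    have hnd : t.Nodup := hst.imp (fun h => ne_of_lt h)
    have hmap : (t.map (fun y => y - x)).count d = t.count (x + d) := by
      have hinj : Function.Injective (fun y : Int => y - x) := by
        intro a b h; simp only [] at h; omega
      have hmap0 : (t.map (fun y : Int => y - x)).count ((fun y : Int => y - x) (x + d))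
          = t.count (x + d) := List.count_map_of_injective _ _ hinj _
      simpa using hmap0
    have hcnt : t.count (x + d) = (if (x + d) ∈ t then 1 else 0) := by
      by_cases hmem : (x + d) ∈ t
      · simp [hmem, List.count_eq_one_of_mem hnd hmem]
      · simp [hmem, List.count_eq_zero_of_not_mem hmem]
    have hhx : ((x + d) ∈ (x :: t)) ↔ ((x + d) ∈ t) := by
      constructor
      · intro h
        rcases List.mem_cons.mp h with h | h
        · exact absurd h (by omega)
        · exact h
      · exact fun h => List.mem_cons_of_mem _ h
    have htcongr : t.countP (fun p => decide ((p + d) ∈ (x :: t)))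
        = t.countP (fun p => decide ((p + d) ∈ t)) := by
      apply List.countP_congr
      intro p hp
      have hxp : x < p := hlt p hp
      have hpp : ((p + d) ∈ (x :: t)) ↔ ((p + d) ∈ t) := by
        constructor
        · intro h
          rcases List.mem_cons.mp h with h | h
          · exact absurd h (by omega)
          · exact h
        · exact fun h => List.mem_cons_of_mem _ h
      simp [hpp]
    simp only [pvPairs, List.count_append, List.countP_cons, hmap, hcnt, htcongr, ih hst,
      hhx, decide_eq_true_eq]
    by_cases hmem : (x + d) ∈ t <;> simp [hmem] <;> omega

/-- `pvPos` is strictly increasing. -/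
lemma pvPos_sorted (s : List Char) (c : Char) : (pvPos s c).Pairwise (· < ·) := by
  unfold pvPos
  exact List.Pairwise.map _ (fun a b h => h)
    ((PySem.List.pairwise_lt_enumerate s 0).filter _)

/-- Membership in `pvPos`. -/
lemma pvPos_mem (s : List Char) (c : Char) (q : Int) :
    q ∈ pvPos s c ↔ 0 ≤ q ∧ s[q.toNat]? = some c := by
  unfold pvPos
  constructor
  · intro hq
    obtain ⟨p, hp, rfl⟩ := List.mem_map.mp hq
    obtain ⟨hpe, hpc⟩ := List.mem_filter.mp hp
    obtain ⟨k, hk, rfl⟩ := ((PySem.List.mem_enumerate_iff ..).mp hpe)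
    simp only at hpc ⊢
    have hkk : ((0 + (k : Int)).toNat) = k := by omega
    refine ⟨by positivity, ?_⟩
    rw [hkk, List.getElem?_eq_getElem hk]
    simp only [beq_iff_eq] at hpc
    rw [hpc]
  · rintro ⟨h0, hsome⟩
    obtain ⟨hk, hval⟩ := List.getElem?_eq_some_iff.mp hsome
    refine List.mem_map.mpr ⟨(q, c), List.mem_filter.mpr ⟨?_, by simp⟩, rfl⟩
    refine ((PySem.List.mem_enumerate_iff ..).mpr ⟨q.toNat, hk, ?_⟩)
    have hq : q = 0 + (q.toNat : Int) := by omega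
    rw [← hval, ← hq]

/-- Indicator sums over a Nodup list. -/
lemma pvSum_indicator_zero (C : List Char) (a : Char) (ha : a ∉ C) :
    (C.map (fun c => if a = c then (1 : Nat) else 0)).sum = 0 := by
  induction C with
  | nil => rfl
  | cons c C ih =>
    have hac : a ≠ c := fun h => ha (h ▸ List.mem_cons_self ..)
    simp only [List.map_cons, List.sum_cons, if_neg hac,
      ih (fun h => ha (List.mem_cons_of_mem _ h))]

lemma pvSum_indicator (C : List Char) (a : Char) (hC : C.Nodup) (ha : a ∈ C) :
    (C.map (fun c => if a = c then (1 : Nat) else 0)).sum = 1 := by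
  induction C with
  | nil => cases ha
  | cons c C ih =>
    rcases List.mem_cons.mp ha with rfl | hmem
    · have hnot : a ∉ C := (List.nodup_cons.mp hC).1
      simp [pvSum_indicator_zero C a hnot]
    · have hac : a ≠ c := fun h => (List.nodup_cons.mp hC).1 (h ▸ hmem)
      simp [hac, ih (List.nodup_cons.mp hC).2 hmem]

/-- Splitting a count over a classifier with values in a Nodup list. -/
lemma pvCountP_split (C : List Char) (hC : C.Nodup) (l : List Nat) (f : Nat → Char)
    (hf : ∀ x ∈ l, f x ∈ C) (p : Nat → Bool) :
    l.countP p = (C.map (fun c => l.countP (fun x => p x && (f x == c)))).sum := by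
  induction l with
  | nil => simp
  | cons x l ih =>
    have hf' : ∀ y ∈ l, f y ∈ C := fun y hy => hf y (List.mem_cons_of_mem _ hy)
    simp only [List.countP_cons]
    rw [List.sum_map_add, ← ih hf']
    congr 1
    cases hp : p x with
    | true =>
      have hmemx := hf x (List.mem_cons_self ..)
      have hmap : (C.map (fun c => if (true && (f x == c)) = true then (1 : Nat) else 0))
          = C.map (fun c => if f x = c then (1 : Nat) else 0) :=
        List.map_congr_left (fun c _ => by simp [beq_iff_eq])
      rw [hmap, pvSum_indicator C (f x) hC hmemx]
      simp
    | false => simp [hp]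

/-- A count over `range N` restricted to `range M` when the predicate dies above `M`. -/
lemma pvCountP_range_restrict (N M : Nat) (hM : M ≤ N) (p : Nat → Bool)
    (h : ∀ j, M ≤ j → j < N → p j = false) :
    (List.range N).countP p = (List.range M).countP p := by
  obtain ⟨k, rfl⟩ : ∃ k, N = M + k := ⟨N - M, by omega⟩
  rw [List.range_add, List.countP_append]
  have hz : ((List.range k).map (M + ·)).countP p = 0 :=
    List.countP_eq_zero.mpr (by
      intro a ha
      obtain ⟨j, hj, rfl⟩ := List.mem_map.mp ha
      have hjk : j < k := List.mem_range.mp hj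
      simp [h (M + j) (by omega) (by omega)])
  omega

/-- A count over `pvPos` as a count over indices. -/
lemma pvPos_countP (s : List Char) (c : Char) (q : Int → Bool) :
    (pvPos s c).countP q
    = (List.range s.length).countP (fun k : Nat => q (k : Int) && decide (s[k]? = some c)) := by
  unfold pvPos
  have henum : PySem.List.enumerate s
      = (PySem.List.pyRange 0 ((s.length : Int)) 1).map
          (fun j => (j, PySem.List.pyGetD s j 'A')) := by
    have := PySem.List.enumerate_eq_map_pyRange (xs := s) (d := 'A')
    simpa using this
  rw [List.countP_map, List.countP_filter, henum, List.countP_map,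
    PySem.List.pyRange_one 0 ((s.length : Int))]
  have hlen : (((s.length : Int)) - 0).toNat = s.length := by omega
  rw [hlen, List.countP_map]
  apply List.countP_congr
  intro k hk
  have hk' : k < s.length := List.mem_range.mp hk
  simp only [Function.comp_apply]
  have e0 : (0 + (k : Int)) = (k : Int) := by ring
  rw [e0, PySem.List.pyGetD_natCast]
  have hgd : s.getD k 'A' = s[k] := List.getD_eq_getElem s 'A' hk'
  rw [hgd, List.getElem?_eq_getElem hk']
  by_cases hc : s[k] = c
  · simp [hc]
  · simp [hc]

/-- Per-character pair count over indices (with the total index predicate). -/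
lemma pvPosCount (s : List Char) (c : Char) (d : Int) (hd : 1 ≤ d) :
    (pvPairs (pvPos s c)).count d
    = (List.range s.length).countP
        (fun j => decide (s[j]? = some c ∧ s[j + d.toNat]? = some c)) := by
  rw [pvPairs_count _ d hd (pvPos_sorted s c), pvPos_countP]
  apply List.countP_congr
  intro k _
  have hmem : (((k : Int) + d) ∈ pvPos s c) ↔ s[k + d.toNat]? = some c := by
    rw [pvPos_mem]
    have htn : ((k : Int) + d).toNat = k + d.toNat := by omega
    constructor
    · rintro ⟨_, hsv⟩
      rw [htn] at hsv
      exact hsv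
    · intro hsv
      exact ⟨by omega, by rw [htn]; exact hsv⟩
  by_cases h1 : s[k]? = some c
  · by_cases h2 : s[k + d.toNat]? = some c
    · simp [hmem, h1, h2]
    · simp [hmem, h1, h2]
  · simp [hmem, h1]

/-- The distance histogram counts exactly A's per-shift matches (d ≥ 1). -/
lemma pvDists_count (s : List Char) (d : Int) (hd : 1 ≤ d) :
    (((pvDists s).count d : Nat) : Int) = pvCnt s d := by
  have ht1 : 1 ≤ d.toNat := by omega
  -- zip form = total range form
  have hzip : (s.zip (s.drop d.toNat)).countP (fun p => p.1 == p.2)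
      = (List.range s.length).countP (fun j => s[j]? == s[j + d.toNat]?) := by
    rw [pvCountP_zip]
    have hlen : min s.length (s.drop d.toNat).length = s.length - d.toNat := by
      rw [List.length_drop]
      omega
    rw [hlen]
    have hcg : (List.range (s.length - d.toNat)).countP (fun k => s[k]? == (s.drop d.toNat)[k]?)
        = (List.range (s.length - d.toNat)).countP (fun j => s[j]? == s[j + d.toNat]?) := by
      apply List.countP_congr
      intro k _
      rw [List.getElem?_drop, Nat.add_comm]
    rw [hcg]
    exact (pvCountP_range_restrict s.length (s.length - d.toNat) (by omega) _ (by
      intro j hj1 hj2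
      have hnone : s[j + d.toNat]? = none := by
        apply List.getElem?_eq_none
        omega
      have hsome : ∃ v, s[j]? = some v := ⟨s[j], List.getElem?_eq_getElem hj2⟩
      obtain ⟨v, hv⟩ := hsome
      simp [hv, hnone])).symm
  -- split over the distinct characters
  have hsplit : (List.range s.length).countP (fun j => s[j]? == s[j + d.toNat]?)
      = ((PySem.Set.ofList s).map
          (fun c => (pvPairs (pvPos s c)).count d)).sum := by
    rw [pvCountP_split (PySem.Set.ofList s) (PySem.Set.nodup_ofList s) _
      (fun j => s.getD j 'A')
      (by
        intro j hj
        have hj' : j < s.length := List.mem_range.mp hj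
        show s.getD j 'A' ∈ PySem.Set.ofList s
        rw [List.getD_eq_getElem s 'A' hj']
        exact (PySem.Set.mem_ofList ..).mpr (List.getElem_mem hj')) _]
    apply congrArg List.sum
    apply List.map_congr_left
    intro c _
    rw [pvPosCount s c d hd]
    apply List.countP_congr
    intro j hj
    have hj' : j < s.length := List.mem_range.mp hj
    rw [List.getD_eq_getElem s 'A' hj']
    by_cases h1 : s[j] = c
    · by_cases h2 : s[j + d.toNat]? = some c
      · simp [List.getElem?_eq_getElem hj', h1, h2]
      · have h2' : some c ≠ s[j + d.toNat]? := fun hcon => h2 hcon.symm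
        simp [List.getElem?_eq_getElem hj', h1, h2, h2']
    · simp [List.getElem?_eq_getElem hj', h1]
  -- count over the flatMap
  have hflat : (pvDists s).count d
      = ((PySem.Set.ofList s).map (fun c => (pvPairs (pvPos s c)).count d)).sum := by
    unfold pvDists
    rw [List.count_flatMap]
    apply congrArg List.sum
    apply List.map_congr_left
    intro c _
    rfl
  have hNat : (pvDists s).count d = (s.zip (s.drop d.toNat)).countP (fun p => p.1 == p.2) :=
    hflat.trans (hsplit.symm.trans hzip.symm)
  unfold pvCnt
  exact congrArg Nat.cast hNat

/-- Every recorded distance is ≥ 1. -/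
lemma pvDists_pos (s : List Char) : ∀ x ∈ pvDists s, 1 ≤ x := by
  intro x hx
  obtain ⟨c, _, hm⟩ := List.mem_flatMap.mp hx
  exact pvPairs_pos _ (pvPos_sorted s c) x hm

/-- The whole bridge, for an arbitrary resolved `max_size`. -/
lemma pvMain (s : List Char) (ms : Int) :
    ((PySem.List.pyRange 1 (ms + 1) 1).foldl
      (fun (st : Int × Int) i =>
        let curr_match : Int :=
          (PySem.List.pyRange 0 ((s.length : Int) - i) 1).foldl
            (fun acc j =>
              if PySem.List.pyGet? s j = PySem.List.pyGet? s (j + i) then acc + 1 else acc) 0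
        if curr_match > st.2 then (i, curr_match) else st)
      (0, 0)).1
    = ((((PySem.List.enumerate s).foldl
          (fun d p => d.modify p.2 [] (fun l => l ++ [p.1])) PySem.Dict.empty).values.foldl
        (fun cd pos =>
          (PySem.List.pyRange 0 ((pos.length : Int)) 1).foldl
            (fun cd a =>
              (PySem.List.pyRange (a + 1) ((pos.length : Int)) 1).foldl
                (fun cd b =>
                  cd.insert (PySem.List.pyGetD pos b 0 - PySem.List.pyGetD pos a 0)
                    (cd.getD (PySem.List.pyGetD pos b 0 - PySem.List.pyGetD pos a 0) 0 + 1)) cd) cd)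
        PySem.Dict.empty).items.foldl
        (fun (st : Int × Int) dc =>
          if dc.1 ≤ ms ∧ (dc.2 > st.1 ∨ (dc.2 = st.1 ∧ dc.1 < st.2)) then (dc.2, dc.1) else st)
        (0, 0)).2 := by
  -- A's inner loop becomes pvCnt
  rw [PySem.List.foldl_congr_mem _ _
    (fun (st : Int × Int) i => if pvCnt s i > st.2 then (i, pvCnt s i) else st) _
    (by
      intro st i hi
      have h1 := (PySem.List.mem_pyRange_one.mp hi).1
      simp only
      rw [pvInner_eq s i (by omega)])]
  rw [pvFoldA_char]
  -- B's dict pipeline becomes the counter of pvDists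
  rw [pvPositions_values]
  have hphi : (fun (cd : PySem.Dict Int Int) (pos : List Int) =>
      (PySem.List.pyRange 0 ((pos.length : Int)) 1).foldl
        (fun cd a =>
          (PySem.List.pyRange (a + 1) ((pos.length : Int)) 1).foldl
            (fun cd b =>
              cd.insert (PySem.List.pyGetD pos b 0 - PySem.List.pyGetD pos a 0)
                (cd.getD (PySem.List.pyGetD pos b 0 - PySem.List.pyGetD pos a 0) 0 + 1)) cd) cd)
      = (fun (cd : PySem.Dict Int Int) (pos : List Int) =>
          (pvPairs pos).foldl (fun cd x => cd.insert x (cd.getD x 0 + 1)) cd) :=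
    funext fun cd => funext fun pos => pvInnerB pos cd
  rw [hphi, ← List.foldl_flatMap,
    PySem.Dict.foldl_insert_getD_add_one_eq_counter, PySem.Dict.items_counter]
  -- abbreviations
  set DL : List Int := ((PySem.Set.ofList s).map (fun c => pvPos s c)).flatMap pvPairs with hDL
  have hDLd : DL = pvDists s := by rw [hDL, List.flatMap_map]; rfl
  set M : Int := ((PySem.List.pyRange 1 (ms + 1) 1).map (fun i => pvCnt s i)).foldl max 0
    with hMdef
  set r : Int × Int := ((PySem.Set.ofList DL).map (fun k => (k, (DL.count k : Int)))).foldl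
      (fun (st : Int × Int) dc =>
        if dc.1 ≤ ms ∧ (dc.2 > st.1 ∨ (dc.2 = st.1 ∧ dc.1 < st.2)) then (dc.2, dc.1) else st)
      (0, 0) with hrdef
  -- facts
  have hL : ∀ x ∈ PySem.Set.ofList DL, 1 ≤ x ∧ 1 ≤ ((DL.count x : Nat) : Int) := by
    intro x hx
    have hx' : x ∈ DL := (PySem.Set.mem_ofList ..).mp hx
    have hc : 0 < DL.count x := List.count_pos_iff.mpr hx'
    exact ⟨by rw [hDLd] at hx'; exact pvDists_pos s x hx', by omega⟩
  have hchar := pvFoldB_char ms (fun k => ((DL.count k : Nat) : Int)) (PySem.Set.ofList DL)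
    hL r (by exact hrdef)
  simp only [] at hchar
  have hub : ∀ y ∈ PySem.List.pyRange 1 (ms + 1) 1, pvCnt s y ≤ M := by
    intro y hy
    exact (PySem.List.le_foldl_max _ _).2 _ (List.mem_map_of_mem hy)
  have hM0 : 0 ≤ M := (PySem.List.le_foldl_max _ _).1
  have hcnt : ∀ y : Int, 1 ≤ y → ((DL.count y : Nat) : Int) = pvCnt s y := by
    intro y hy
    rw [hDLd]
    exact pvDists_count s y hy
  by_cases hMpos : M > 0
  · rw [if_pos hMpos]
    -- attainment of the max
    rcases pvFoldMax_attained ((PySem.List.pyRange 1 (ms + 1) 1).map (fun i => pvCnt s i)) 0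
      with hA | hA
    · rw [← hMdef] at hA; omega
    · rw [← hMdef] at hA
      obtain ⟨d0, hd0mem, hd0⟩ := List.mem_map.mp hA
      have hd0r := PySem.List.mem_pyRange_one.mp hd0mem
      have hd0cnt : ((DL.count d0 : Nat) : Int) = M := by
        rw [hcnt d0 (by omega)]; exact hd0
      have hd0L : d0 ∈ PySem.Set.ofList DL := by
        refine (PySem.Set.mem_ofList ..).mpr (List.count_pos_iff.mp (by omega))
      rcases hchar with ⟨_, hnone⟩ | ⟨hmem, hms2, hf, hall⟩
      · exact absurd (by omega : d0 ≤ ms) (hnone d0 hd0L)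
      · have h1 : 1 ≤ r.2 := (hL _ hmem).1
        have hr2cnt := hcnt r.2 h1
        have hr2ub : pvCnt s r.2 ≤ M :=
          hub r.2 (PySem.List.mem_pyRange_one.mpr ⟨h1, by omega⟩)
        have hd0cl := hall d0 hd0L (by omega)
        have hr1 : r.1 = M := by rcases hd0cl with h | ⟨h, _⟩ <;> omega
        have hfind : (PySem.List.pyRange 1 (ms + 1) 1).find?
            (fun i => decide (M ≤ pvCnt s i)) = some r.2 := by
          apply pvFind_sorted _ _ _ (PySem.List.pairwise_lt_pyRange_one _ _)
          · exact PySem.List.mem_pyRange_one.mpr ⟨h1, by omega⟩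
          · exact decide_eq_true (by omega)
          · intro y hy hylt
            have hyr := PySem.List.mem_pyRange_one.mp hy
            by_cases hpy : M ≤ pvCnt s y
            · exfalso
              have hyub := hub y hy
              have hycnt := hcnt y (by omega)
              have hyL : y ∈ PySem.Set.ofList DL :=
                (PySem.Set.mem_ofList ..).mpr (List.count_pos_iff.mp (by omega))
              rcases hall y hyL (by omega) with h | ⟨_, h2⟩ <;> omega
            · simp [hpy]
        rw [hfind]
        rfl
  · rw [if_neg hMpos]
    rcases hchar with ⟨h0, _⟩ | ⟨hmem, hms2, hf, _⟩
    · rw [h0]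
    · exfalso
      have h1 : 1 ≤ r.2 := (hL _ hmem).1
      have h2 : 1 ≤ ((DL.count r.2 : Nat) : Int) := (hL _ hmem).2
      have h3 : pvCnt s r.2 ≤ M :=
        hub r.2 (PySem.List.mem_pyRange_one.mpr ⟨h1, by omega⟩)
      have h4 := hcnt r.2 h1
      omega

-- ===== VERDICT (by name: the statement is the Claim_ definition above) =====
theorem get_key_size_spec : Claim_equal_get_key_size := by
  intro message mk _
  simp only [Spec_get_key_size, get_key_size, get_key_size_alt]
  cases mk with
  | none => exact pvMain message.toList _
  | some m => exact pvMain message.toList _
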